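-- pv_equiv track=rewrite | github.com/inesiscosta/examiners-students-distribution | csp.py | assign_examiners
-- ===== SOURCE A (Python) =====
-- def assign_examiners(students, examiners):
--     assignments = {}
--     supervisor_workload = {supervisor: 0 for supervisor in examiners}
--
--     for student in students:
--         eligible_supervisors = [s for s in examiners if student not in examiners[s]]
--
--         # Sort eligible supervisors by current workload to balance assignments
--         eligible_supervisors.sort(key=lambda s: supervisor_workload[s])
--
--         # Assign two supervisors with the least workload
--         assigned = eligible_supervisors[:2]
--         assignments[student] = assigned
--
--         # Update workload
--         for supervisor in assigned:
--             supervisor_workload[supervisor] += 1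
--
--     return assignments, supervisor_workload
-- ===== SOURCE B (Python) =====
-- def assign_examiners(students, examiners):
--     assignments = {}
--     workload = dict.fromkeys(examiners, 0)
--     for student in students:
--         # one linear pass keeping the two least-loaded eligible supervisors
--         # (stable: strict '<' keeps earlier supervisors on ties)
--         best1 = best2 = None
--         for supervisor, advisees in examiners.items():
--             if student in advisees:
--                 continue
--             w = workload[supervisor]
--             if best1 is None or w < workload[best1]:
--                 best1, best2 = supervisor, best1
--             elif best2 is None or w < workload[best2]:
--                 best2 = supervisor
--         assigned = [s for s in (best1, best2) if s is not None]
--         assignments[student] = assigned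
--         for s in assigned:
--             workload[s] += 1
--     return assignments, workload
-- ===== Notes on version B (the rewrite author's own statement) =====
-- stated objective: alternative
-- what changed: Per student, A stable-sorts all eligible supervisors by workload and takes the first two; B makes a single linear two-minimum scan keeping the two least-loaded eligible supervisors (strict '<' preserves the stable tie order), so no sorted list is ever built.
import Mathlib
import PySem

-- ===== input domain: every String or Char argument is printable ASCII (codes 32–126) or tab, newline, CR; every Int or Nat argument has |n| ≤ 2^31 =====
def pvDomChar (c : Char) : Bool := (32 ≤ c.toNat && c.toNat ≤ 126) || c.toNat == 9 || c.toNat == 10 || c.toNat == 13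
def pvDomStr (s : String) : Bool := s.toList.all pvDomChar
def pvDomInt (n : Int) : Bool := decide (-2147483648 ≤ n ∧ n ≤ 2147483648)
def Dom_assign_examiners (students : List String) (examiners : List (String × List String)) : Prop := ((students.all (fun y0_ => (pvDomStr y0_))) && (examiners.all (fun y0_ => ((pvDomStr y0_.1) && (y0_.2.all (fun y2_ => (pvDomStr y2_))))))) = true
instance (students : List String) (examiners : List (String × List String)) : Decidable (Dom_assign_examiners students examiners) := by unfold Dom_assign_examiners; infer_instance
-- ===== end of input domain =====

-- B replaces A's per-student full sort of the eligible supervisors by a single linear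
-- two-minimum scan (stable on ties, like Python's stable sort); same return value.

-- ===== PORT A =====
-- loop body of A: for one student, filter, stable sort by workload, take first two
def pvStepA (ex : PySem.Dict String (List String))
    (acc : PySem.Dict String (List String) × PySem.Dict String Int) (student : String) :
    PySem.Dict String (List String) × PySem.Dict String Int :=
  -- eligible_supervisors = [s for s in examiners if student not in examiners[s]]
  let eligible := ex.keys.filter (fun s => !((ex.getD s []).contains student))
  -- eligible_supervisors.sort(key=lambda s: supervisor_workload[s])   (stable sort)
  let eligibleSorted := PySem.List.sorted eligible (fun s => acc.2.getD s 0) false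
  -- assigned = eligible_supervisors[:2]
  let assigned := eligibleSorted.take 2
  -- assignments[student] = assigned ; for supervisor in assigned: workload[supervisor] += 1
  (acc.1.insert student assigned,
   assigned.foldl (fun d s => d.modify s 0 (· + 1)) acc.2)

def assign_examiners (students : List String) (examiners : List (String × List String)) : (List (String × List String)) × (List (String × Int)) :=
  -- examiners is a Python dict: build it as a PySem.Dict (insertion order, last value wins)
  let ex : PySem.Dict String (List String) := PySem.Dict.ofList examiners
  -- assignments = {} ; supervisor_workload = {supervisor: 0 for supervisor in examiners}
  let init : PySem.Dict String (List String) × PySem.Dict String Int :=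
    (PySem.Dict.empty, ex.keys.foldl (fun d s => d.insert s 0) PySem.Dict.empty)
  let res := students.foldl (pvStepA ex) init
  (res.1.items, res.2.items)

-- ===== PORT B =====
-- inner loop of Source B: keep the two least-loaded eligible supervisors seen so far
def pvTwoMinStep (wl : PySem.Dict String Int) (student : String)
    (bb : Option String × Option String) (p : String × List String) :
    Option String × Option String :=
  if p.2.contains student then bb
  else
    let w := wl.getD p.1 0
    match bb.1 with
    | none => (some p.1, bb.1)
    | some t =>
      if w < wl.getD t 0 then (some p.1, bb.1)
      else
        match bb.2 with
        | none => (bb.1, some p.1)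
        | some u => if w < wl.getD u 0 then (bb.1, some p.1) else bb

-- loop body of B: one linear scan keeping the two least-loaded eligible supervisors
def pvStepB (ex : PySem.Dict String (List String))
    (acc : PySem.Dict String (List String) × PySem.Dict String Int) (student : String) :
    PySem.Dict String (List String) × PySem.Dict String Int :=
  -- best1 = best2 = None ; for supervisor, advisees in examiners.items(): …
  let bb := ex.items.foldl (pvTwoMinStep acc.2 student) (none, none)
  -- assigned = [s for s in (best1, best2) if s is not None]
  let assigned := ([bb.1, bb.2] : List (Option String)).filterMap id
  (acc.1.insert student assigned,
   assigned.foldl (fun d s => d.modify s 0 (· + 1)) acc.2)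

def assign_examiners_alt (students : List String) (examiners : List (String × List String)) : (List (String × List String)) × (List (String × Int)) :=
  let ex : PySem.Dict String (List String) := PySem.Dict.ofList examiners
  -- assignments = {} ; workload = dict.fromkeys(examiners, 0)
  let init : PySem.Dict String (List String) × PySem.Dict String Int :=
    (PySem.Dict.empty, ex.keys.foldl (fun d s => d.insert s 0) PySem.Dict.empty)
  let res := students.foldl (pvStepB ex) init
  (res.1.items, res.2.items)

-- ===== PRECONDITION & SPEC =====
def Spec_assign_examiners (students : List String) (examiners : List (String × List String)) (out : (List (String × List String)) × (List (String × Int))) : Prop := out = assign_examiners_alt students examiners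
instance (students : List String) (examiners : List (String × List String)) (out : (List (String × List String)) × (List (String × Int))) : Decidable (Spec_assign_examiners students examiners out) := by unfold Spec_assign_examiners; infer_instance

-- ===== CLAIM (what is proved, stated in full; the proofs are below) =====
def Claim_equal_assign_examiners : Prop := ∀ (students : List String) (examiners : List (String × List String)), Dom_assign_examiners students examiners → Spec_assign_examiners students examiners (assign_examiners students examiners)

-- ===== LEMMAS AND PROOFS =====

-- the two-minimum step on supervisor NAMES only (the ineligible pairs already skipped)
def pvNameStep (k : String → Int) (bb : Option String × Option String) (s : String) :
    Option String × Option String :=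
  match bb.1 with
  | none => (some s, bb.1)
  | some t =>
    if k s < k t then (some s, bb.1)
    else
      match bb.2 with
      | none => (bb.1, some s)
      | some u => if k s < k u then (bb.1, some s) else bb

-- first two elements of a list, as the scan's pair of options
def pvFirstTwo (l : List String) : Option String × Option String :=
  match l with
  | [] => (none, none)
  | [a] => (some a, none)
  | a :: b :: _ => (some a, some b)

theorem pvTwoMinStep_eq (wl : PySem.Dict String Int) (student : String)
    (bb : Option String × Option String) (p : String × List String) :
    pvTwoMinStep wl student bb p =
      if p.2.contains student then bb else pvNameStep (fun s => wl.getD s 0) bb p.1 := by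
  simp [pvTwoMinStep, pvNameStep]

-- folding the fused step over pairs = folding the name step over the filtered names
theorem pvFoldPairs (wl : PySem.Dict String Int) (student : String)
    (l : List (String × List String)) (bb : Option String × Option String) :
    l.foldl (pvTwoMinStep wl student) bb =
      ((l.filter (fun p => !(p.2.contains student))).map (·.1)).foldl
        (pvNameStep (fun s => wl.getD s 0)) bb := by
  induction l generalizing bb with
  | nil => rfl
  | cons p t ih =>
    simp only [List.foldl_cons, pvTwoMinStep_eq, List.filter_cons]
    by_cases h : student ∈ p.2
    · simp [h, ih]
    · simp [h, ih]

-- A's eligible list over keys = the filtered items' names (keys are unique)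
theorem pvEligible_aux (ex : PySem.Dict String (List String)) (student : String)
    (l : List (String × List String)) (hall : ∀ p ∈ l, ex.getD p.1 [] = p.2) :
    (l.map (·.1)).filter (fun s => !((ex.getD s []).contains student)) =
      (l.filter (fun p => !(p.2.contains student))).map (·.1) := by
  induction l with
  | nil => rfl
  | cons p t ih =>
    have hp : ex.getD p.1 [] = p.2 := hall p (by simp)
    have ih' := ih (fun q hq => hall q (by simp [hq]))
    simp only [List.map_cons, List.filter_cons, hp]
    by_cases h : student ∈ p.2
    · simpa [h] using ih'
    · simpa [h] using ih' 

-- A's eligible list over keys = the filtered items' names (keys are unique)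
theorem pvEligible_eq (ex : PySem.Dict String (List String)) (student : String)
    (hnd : ex.keys.Nodup) :
    ex.keys.filter (fun s => !((ex.getD s []).contains student)) =
      (ex.items.filter (fun p => !(p.2.contains student))).map (·.1) := by
  have hall : ∀ p ∈ ex.items, ex.getD p.1 [] = p.2 := by
    intro p hp
    exact PySem.Dict.getD_of_mem_items ex hp hnd []
  exact pvEligible_aux ex student ex.items hall

-- one insertion step: the name step updates the first-two pair exactly like a stable insert
theorem pvNameStep_insertBy (k : String → Int) (l : List String) (x : String) :
    pvNameStep k (pvFirstTwo l) x =
      pvFirstTwo (PySem.List.insertBy (fun a b => decide (k a < k b)) x l) := by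
  match l with
  | [] => simp [pvNameStep, pvFirstTwo, PySem.List.insertBy]
  | [a] =>
    by_cases h : k x < k a
    · simp [pvNameStep, pvFirstTwo, PySem.List.insertBy, h]
    · simp [pvNameStep, pvFirstTwo, PySem.List.insertBy, h]
  | a :: b :: t =>
    by_cases h : k x < k a
    · simp [pvNameStep, pvFirstTwo, PySem.List.insertBy, h]
    · by_cases h2 : k x < k b
      · simp [pvNameStep, pvFirstTwo, PySem.List.insertBy, h, h2]
      · simp [pvNameStep, pvFirstTwo, PySem.List.insertBy, h, h2]

-- the whole scan computes the first two of the insertion sort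
theorem pvScan_eq_firstTwo_sorted (k : String → Int) (xs : List String) :
    xs.foldl (pvNameStep k) (none, none) = pvFirstTwo (PySem.List.sorted xs k false) := by
  rw [PySem.List.sorted_eq_foldl_insertBy]
  have : ∀ (l : List String),
      xs.foldl (pvNameStep k) (pvFirstTwo l) =
        pvFirstTwo (xs.foldl (fun acc x =>
          PySem.List.insertBy (fun a b => decide (k a < k b)) x acc) l) := by
    induction xs with
    | nil => intro l; rfl
    | cons x t ih =>
      intro l
      simp only [List.foldl_cons, pvNameStep_insertBy]
      exact ih _
  exact this []
-- take 2 of a list is the pair of its first two elements, Nones dropped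
theorem pvTake_two (l : List String) :
    l.take 2 = ([(pvFirstTwo l).1, (pvFirstTwo l).2] : List (Option String)).filterMap id := by
  match l with
  | [] => rfl
  | [a] => rfl
  | a :: b :: t => rfl

-- per-student: B's assigned list equals A's assigned list
theorem pvAssigned_eq (ex : PySem.Dict String (List String)) (wl : PySem.Dict String Int)
    (student : String) (hnd : ex.keys.Nodup) :
    (let bb := ex.items.foldl (pvTwoMinStep wl student) (none, none)
     ([bb.1, bb.2] : List (Option String)).filterMap id) =
    (PySem.List.sorted (ex.keys.filter (fun s => !((ex.getD s []).contains student)))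
        (fun s => wl.getD s 0) false).take 2 := by
  rw [pvFoldPairs, ← pvEligible_eq ex student hnd, pvScan_eq_firstTwo_sorted, pvTake_two]

-- ===== VERDICT (by name: the statement is the Claim_ definition above) =====
theorem pvStep_eq (examiners : List (String × List String)) :
    pvStepB (PySem.Dict.ofList examiners) = pvStepA (PySem.Dict.ofList examiners) := by
  funext acc student
  have hnd := PySem.Dict.nodup_keys_ofList (κ := String) (ν := List String) examiners
  simp only [pvStepA, pvStepB]
  rw [pvAssigned_eq (PySem.Dict.ofList examiners) acc.2 student hnd]

theorem assign_examiners_spec : Claim_equal_assign_examiners := by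
  intro students examiners _
  show assign_examiners students examiners = assign_examiners_alt students examiners
  unfold assign_examiners assign_examiners_alt
  simp only [pvStep_eq examiners]
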